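-- pv_equiv track=rewrite | github.com/sgazanfarprism/AI-Logs-analysis | agents/error_parser_agent.py | _group_severity
-- ===== SOURCE A (Python) =====
-- from typing import Dict, List, Any, Optional
--
-- def _group_severity(logs: List[Dict[str, Any]]) -> str:
--     """Determine group severity based on individual log severities"""
--     severities = [log.get("severity", "LOW") for log in logs]
--
--     if "CRITICAL" in severities:
--         return "CRITICAL"
--     elif "HIGH" in severities:
--         return "HIGH"
--     elif "MEDIUM" in severities:
--         return "MEDIUM"
--     else:
--         return "LOW"
-- ===== SOURCE B (Python) =====
-- def _group_severity(logs):
--     """Determine group severity based on individual log severities"""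
--     rank = {"CRITICAL": 3, "HIGH": 2, "MEDIUM": 1}
--     best = 0
--     for log in logs:
--         best = max(best, rank.get(log.get("severity", "LOW"), 0))
--     return {3: "CRITICAL", 2: "HIGH", 1: "MEDIUM"}.get(best, "LOW")
-- ===== Notes on version B (the rewrite author's own statement) =====
-- stated objective: simpler
-- what changed: Replaced the list-build plus four priority-ordered membership scans with a single max-of-ranks pass over the logs and a rank-to-label lookup.
import Mathlib
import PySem

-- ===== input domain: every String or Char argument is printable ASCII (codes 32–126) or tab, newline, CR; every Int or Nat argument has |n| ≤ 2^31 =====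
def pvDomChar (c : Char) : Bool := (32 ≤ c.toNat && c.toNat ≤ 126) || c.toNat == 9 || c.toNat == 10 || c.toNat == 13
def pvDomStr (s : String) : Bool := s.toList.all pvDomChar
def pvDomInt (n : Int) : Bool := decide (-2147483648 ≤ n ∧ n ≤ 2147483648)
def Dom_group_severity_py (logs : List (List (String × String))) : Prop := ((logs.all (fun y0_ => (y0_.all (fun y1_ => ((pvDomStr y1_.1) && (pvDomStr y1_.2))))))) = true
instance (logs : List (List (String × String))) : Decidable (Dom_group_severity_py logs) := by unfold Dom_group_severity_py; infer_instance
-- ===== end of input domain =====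

-- B replaces A's list-build plus four priority-ordered membership scans by one
-- max-of-ranks pass and a rank-to-label lookup (objective: simpler decomposition).


-- ===== PORT A =====
def group_severity_py (logs : List (List (String × String))) : String :=
  let severities := logs.map (fun log => (PySem.Dict.mk log).getD "severity" "LOW")
  if severities.contains "CRITICAL" then "CRITICAL"
  else if severities.contains "HIGH" then "HIGH"
  else if severities.contains "MEDIUM" then "MEDIUM"
  else "LOW"

-- ===== PORT B =====
def group_severity_py_alt (logs : List (List (String × String))) : String :=
  let rank : PySem.Dict String Int := PySem.Dict.ofList [("CRITICAL", 3), ("HIGH", 2), ("MEDIUM", 1)]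
  let best := logs.foldl
    (fun best log => max best (rank.getD ((PySem.Dict.mk log).getD "severity" "LOW") 0)) (0 : Int)
  (PySem.Dict.ofList [((3 : Int), "CRITICAL"), (2, "HIGH"), (1, "MEDIUM")]).getD best "LOW"

-- ===== PRECONDITION & SPEC =====
def Spec_group_severity_py (logs : List (List (String × String))) (out : String) : Prop := out = group_severity_py_alt logs
instance (logs : List (List (String × String))) (out : String) : Decidable (Spec_group_severity_py logs out) := by unfold Spec_group_severity_py; infer_instance

-- ===== CLAIM (what is proved, stated in full; the proofs are below) =====
def Claim_equal_group_severity_py : Prop := ∀ (logs : List (List (String × String))), Dom_group_severity_py logs → Spec_group_severity_py logs (group_severity_py logs)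

-- ===== LEMMAS AND PROOFS =====

-- the severity string both ports extract from one log
def pvSev (log : List (String × String)) : String := (PySem.Dict.mk log).getD "severity" "LOW"

-- B's rank of one severity string
def pvRnk (s : String) : Int :=
  (PySem.Dict.ofList [("CRITICAL", 3), ("HIGH", 2), ("MEDIUM", 1)]).getD s 0

-- maximum rank of a list of severity strings
def pvMr (l : List String) : Int := l.foldr (fun s m => max (pvRnk s) m) 0

theorem pvRnk_eq (s : String) :
    pvRnk s = if s = "CRITICAL" then 3 else if s = "HIGH" then 2 else if s = "MEDIUM" then 1 else 0 := by
  have h : (PySem.Dict.ofList [("CRITICAL", (3:Int)), ("HIGH", 2), ("MEDIUM", 1)])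
      = PySem.Dict.mk [("CRITICAL", 3), ("HIGH", 2), ("MEDIUM", 1)] := by decide
  rw [pvRnk, h]
  rcases eq_or_ne s "CRITICAL" with hc | hc <;> rcases eq_or_ne s "HIGH" with hh | hh <;>
    rcases eq_or_ne s "MEDIUM" with hm | hm <;>
      simp [PySem.Dict.getD, PySem.Dict.get?, hc, hh, hm, Ne.symm]

theorem pvMr_nonneg (l : List String) : 0 ≤ pvMr l := by
  induction l with
  | nil => simp [pvMr]
  | cons s t ih => simp [pvMr] at ih ⊢; omega

theorem pvMr_le (l : List String) : pvMr l ≤ 3 := by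
  induction l with
  | nil => simp [pvMr]
  | cons s t ih =>
    have h := pvRnk_eq s
    simp [pvMr] at ih ⊢
    constructor
    · split_ifs at h <;> omega
    · exact ih

theorem mem3 (s : String) : s = "CRITICAL" ↔ 3 ≤ pvRnk s := by
  have h := pvRnk_eq s
  split_ifs at h <;> simp_all

theorem mem2 (s : String) : s = "CRITICAL" ∨ s = "HIGH" ↔ 2 ≤ pvRnk s := by
  have h := pvRnk_eq s
  split_ifs at h <;> simp_all

theorem mem1 (s : String) : s = "CRITICAL" ∨ s = "HIGH" ∨ s = "MEDIUM" ↔ 1 ≤ pvRnk s := by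
  have h := pvRnk_eq s
  split_ifs at h <;> simp_all

theorem contains_crit (l : List String) : l.contains "CRITICAL" = decide (3 ≤ pvMr l) := by
  induction l with
  | nil => simp [pvMr]
  | cons s t ih =>
    simp [pvMr, ← mem3, @eq_comm _ "CRITICAL" s] at *
    simp [ih]

theorem contains_high (l : List String) :
    (l.contains "CRITICAL" || l.contains "HIGH") = decide (2 ≤ pvMr l) := by
  induction l with
  | nil => simp [pvMr]
  | cons s t ih =>
    simp [pvMr, ← mem2, @eq_comm _ "CRITICAL" s, @eq_comm _ "HIGH" s] at *
    rw [Bool.eq_iff_iff] at ih ⊢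
    simp at ih ⊢
    tauto

theorem contains_med (l : List String) :
    (l.contains "CRITICAL" || l.contains "HIGH" || l.contains "MEDIUM") = decide (1 ≤ pvMr l) := by
  induction l with
  | nil => simp [pvMr]
  | cons s t ih =>
    simp [pvMr, ← mem1, @eq_comm _ "CRITICAL" s, @eq_comm _ "HIGH" s, @eq_comm _ "MEDIUM" s] at *
    rw [Bool.eq_iff_iff] at ih ⊢
    simp at ih ⊢
    tauto

theorem foldl_max_acc (logs : List (List (String × String))) (m : Int) (hm : 0 ≤ m) :
    logs.foldl (fun b log => max b (pvRnk (pvSev log))) m = max m (pvMr (logs.map pvSev)) := by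
  induction logs generalizing m with
  | nil => simpa [pvMr] using (max_eq_left hm).symm
  | cons x t ih =>
    rw [List.foldl_cons, ih _ (le_trans hm (le_max_left _ _)), List.map_cons]
    show _ = max m (max (pvRnk (pvSev x)) (pvMr (t.map pvSev)))
    rw [max_assoc]

-- the if-chain of A on a severity list equals B's label lookup on its max rank
theorem chain_eq_label (l : List String) :
    (if l.contains "CRITICAL" then "CRITICAL"
     else if l.contains "HIGH" then "HIGH"
     else if l.contains "MEDIUM" then "MEDIUM" else "LOW")
    = (PySem.Dict.ofList [((3 : Int), "CRITICAL"), (2, "HIGH"), (1, "MEDIUM")]).getD (pvMr l) "LOW" := by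
  have hl : (PySem.Dict.ofList [((3 : Int), "CRITICAL"), (2, "HIGH"), (1, "MEDIUM")])
      = PySem.Dict.mk [((3 : Int), "CRITICAL"), (2, "HIGH"), (1, "MEDIUM")] := by decide
  have h0 := pvMr_nonneg l
  have h3 := pvMr_le l
  have c3 := contains_crit l
  have c2 := contains_high l
  have c1 := contains_med l
  rw [hl]
  have hcase : pvMr l = 0 ∨ pvMr l = 1 ∨ pvMr l = 2 ∨ pvMr l = 3 := by omega
  rcases hcase with h | h | h | h <;> simp_all [PySem.Dict.getD, PySem.Dict.get?]

-- ===== VERDICT =====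
theorem group_severity_py_spec : Claim_equal_group_severity_py := by
  intro logs _
  unfold Spec_group_severity_py group_severity_py group_severity_py_alt
  show _ = (PySem.Dict.ofList [((3 : Int), "CRITICAL"), (2, "HIGH"), (1, "MEDIUM")]).getD
    (logs.foldl (fun b log => max b (pvRnk (pvSev log))) 0) "LOW"
  rw [foldl_max_acc _ _ le_rfl, max_eq_right (pvMr_nonneg _), chain_eq_label]
  rfl
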